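-- pv_equiv track=rewrite | github.com/salwadev/IotSafetyDetection | backend/app.py | encode_base62
-- ===== SOURCE A (Python) =====
-- import string
--
-- BASE62 = string.digits + string.ascii_letters
--
-- def encode_base62(num):
--     if num == 0:
--         return BASE62[0]
--
--     arr = []
--     base = len(BASE62)
--     while num:
--         num, rem = divmod(num, base)
--         arr.append(BASE62[rem])
--     arr.reverse()
--     return ''.join(arr)
-- ===== SOURCE B (Python) =====
-- import string
--
-- BASE62 = string.digits + string.ascii_letters
--
-- def encode_base62(num):
--     if num == 0:
--         return BASE62[0]
--     # compute the number of base-62 digits of num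
--     width = 0
--     p = 1
--     while p <= num:
--         p *= 62
--         width += 1
--     # extract digits most-significant-first by dividing by powers of 62
--     return ''.join(BASE62[(num // 62 ** (width - 1 - i)) % 62] for i in range(width))
-- ===== Notes on version B (the rewrite author's own statement) =====
-- stated objective: alternative
-- what changed: Instead of repeatedly divmod-ing into a list and reversing it, B first computes the digit count with a power-of-62 loop and then extracts each digit most-significant-first by dividing by the corresponding power of 62, so no list and no reverse are built; Pre_ excludes negative inputs, on which A loops forever.
import Mathlib
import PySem

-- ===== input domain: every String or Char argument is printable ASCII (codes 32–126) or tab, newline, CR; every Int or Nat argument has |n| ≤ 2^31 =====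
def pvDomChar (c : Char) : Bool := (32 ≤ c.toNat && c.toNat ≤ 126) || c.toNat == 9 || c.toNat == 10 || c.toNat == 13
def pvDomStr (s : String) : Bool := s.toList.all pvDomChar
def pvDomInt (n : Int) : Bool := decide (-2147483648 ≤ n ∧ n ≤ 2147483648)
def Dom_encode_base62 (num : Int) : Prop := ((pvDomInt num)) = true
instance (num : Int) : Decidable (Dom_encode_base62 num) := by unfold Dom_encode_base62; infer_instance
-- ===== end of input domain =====

-- B computes the digit count first, then extracts digits most-significant-first by
-- dividing by powers of 62 — no list of digits is accumulated and nothing is reversed.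

-- BASE62 = string.digits + string.ascii_letters
def pvBASE62 : List Char := "0123456789abcdefghijklmnopqrstuvwxyzABCDEFGHIJKLMNOPQRSTUVWXYZ".toList

-- ===== PORT A =====
-- the while loop: appends BASE62[rem] for each divmod step; guarded by 0 < num for
-- termination (the Python loop runs while num ≠ 0, but from a nonnegative start num
-- never becomes negative; negative inputs, on which A loops forever, are outside Pre_)
def encAloop (num : Int) (arr : List Char) : List Char :=
  if h : 0 < num then
    encAloop (PySem.Int.floordiv num 62)
      (arr ++ [(PySem.List.pyGet? pvBASE62 (PySem.Int.mod num 62)).getD ' '])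
  else arr
termination_by num.toNat
decreasing_by
  have := PySem.Int.floordiv_eq_ediv_of_pos (a := num) (b := 62) (by omega)
  rw [this]; omega

def encode_base62 (num : Int) : String :=
  if num = 0 then String.ofList [(PySem.List.pyGet? pvBASE62 0).getD ' ']
  else String.ofList ((encAloop num []).reverse)

-- ===== PORT B =====
-- the width-counting loop 'while p <= num: p *= 62; width += 1'; the '1 ≤ p' conjunct is a
-- totality guard only (p starts at 1 and only grows), it never fires on a real run
def encBwidth (num p w : Int) : Int :=
  if h : 1 ≤ p ∧ p ≤ num then encBwidth num (p * 62) (w + 1) else w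
termination_by (num + 1 - p).toNat
decreasing_by omega

-- ''.join(BASE62[(num // 62 ** (width - 1 - i)) % 62] for i in range(width));
-- the exponent width-1-i is ≥ 0 for every i in range(width), so '.toNat' is exact there
def encode_base62_alt (num : Int) : String :=
  if num = 0 then String.ofList [(PySem.List.pyGet? pvBASE62 0).getD ' ']
  else
    let width := encBwidth num 1 0
    String.ofList ((PySem.List.pyRange 0 width 1).map (fun i =>
      (PySem.List.pyGet? pvBASE62
        (PySem.Int.mod (PySem.Int.floordiv num ((62 : Int) ^ (width - 1 - i).toNat)) 62)).getD ' '))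

-- ===== PRECONDITION & SPEC =====
-- Pre_ excludes negative num, on which Python A's while loop never terminates
def Pre_encode_base62 (num : Int) : Prop := 0 ≤ num
instance (num : Int) : Decidable (Pre_encode_base62 num) := by unfold Pre_encode_base62; infer_instance
def pvWitness_encode_base62 : Int := (5)

def Spec_encode_base62 (num : Int) (out : String) : Prop := out = encode_base62_alt num
instance (num : Int) (out : String) : Decidable (Spec_encode_base62 num out) := by unfold Spec_encode_base62; infer_instance

-- ===== CLAIM (what is proved, stated in full; the proofs are below) =====
def Claim_equal_encode_base62 : Prop := ∀ (num : Int), Dom_encode_base62 num → Pre_encode_base62 num → Spec_encode_base62 num (encode_base62 num)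

-- ===== LEMMAS AND PROOFS =====

-- proof helper: the base-62 digits of n, most-significant-first
def pvMsd (n : Int) : List Char :=
  if h : 0 < n then
    pvMsd (PySem.Int.floordiv n 62) ++ [(PySem.List.pyGet? pvBASE62 (PySem.Int.mod n 62)).getD ' ']
  else []
termination_by n.toNat
decreasing_by
  have := PySem.Int.floordiv_eq_ediv_of_pos (a := n) (b := 62) (by omega)
  rw [this]; omega

theorem encAloop_eq (num : Int) (arr : List Char) :
    encAloop num arr = arr ++ (pvMsd num).reverse := by
  induction num, arr using encAloop.induct with
  | case1 n arr h ih =>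
      rw [encAloop, dif_pos h, ih]
      conv_rhs => rw [pvMsd, dif_pos h]
      simp
  | case2 n arr h =>
      rw [encAloop, dif_neg h]
      conv_rhs => rw [pvMsd, dif_neg h]
      simp

theorem encBwidth_shift (num : Int) (hn : 0 ≤ num) :
    ∀ (k : Nat) (m p w : Int), (m + 1 - p).toNat = k → m = num / 62 → 1 ≤ p →
      encBwidth num (62 * p) w = encBwidth m p w := by
  intro k
  induction k using Nat.strong_induction_on with
  | _ k ih =>
    intro m p w hk hm hp
    by_cases h : p ≤ m
    · have hle : p * 62 ≤ num := (Int.le_ediv_iff_mul_le (by norm_num)).mp (hm ▸ h)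
      rw [encBwidth, dif_pos ⟨by omega, by omega⟩]
      conv_rhs => rw [encBwidth, dif_pos ⟨hp, h⟩]
      have h2 : 62 * p * 62 = 62 * (p * 62) := by ring
      rw [h2]
      exact ih (m + 1 - p * 62).toNat (by omega) m (p * 62) (w + 1) rfl hm (by omega)
    · have hnle : ¬ p * 62 ≤ num := by
        intro hc
        exact h (hm ▸ (Int.le_ediv_iff_mul_le (by norm_num)).mpr hc)
      rw [encBwidth, dif_neg (by omega)]
      rw [encBwidth, dif_neg (by simp [hp]; omega)]

theorem encBwidth_offset (num : Int) :
    ∀ (k : Nat) (p w c : Int), (num + 1 - p).toNat = k → 1 ≤ p →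
      encBwidth num p (w + c) = encBwidth num p w + c := by
  intro k
  induction k using Nat.strong_induction_on with
  | _ k ih =>
    intro p w c hk hp
    by_cases h : p ≤ num
    · rw [encBwidth, dif_pos ⟨hp, h⟩]
      conv_rhs => rw [encBwidth, dif_pos ⟨hp, h⟩]
      have h2 : w + c + 1 = w + 1 + c := by ring
      rw [h2]
      exact ih (num + 1 - p * 62).toNat (by omega) (p * 62) (w + 1) c rfl (by omega)
    · rw [encBwidth, dif_neg (by simp [hp]; omega)]
      conv_rhs => rw [encBwidth, dif_neg (by simp [hp]; omega)]

theorem encBwidth_succ (n : Int) (hn : 0 < n) :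
    encBwidth n 1 0 = encBwidth (n / 62) 1 0 + 1 := by
  rw [encBwidth, dif_pos ⟨le_refl 1, by omega⟩]
  have h1 : (1 : Int) * 62 = 62 * 1 := by ring
  rw [h1, encBwidth_shift n (by omega) _ (n / 62) 1 (0 + 1) rfl rfl (le_refl 1)]
  exact encBwidth_offset (n / 62) _ 1 0 1 rfl (le_refl 1)

theorem encBwidth_len (n : Int) (hn : 0 ≤ n) :
    encBwidth n 1 0 = ((pvMsd n).length : Int) := by
  induction n using pvMsd.induct with
  | case1 n h ih =>
      have hfd : PySem.Int.floordiv n 62 = n / 62 :=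
        PySem.Int.floordiv_eq_ediv_of_pos (by norm_num)
      have hm : 0 ≤ n / 62 := Int.ediv_nonneg (by omega) (by norm_num)
      rw [encBwidth_succ n h, pvMsd, dif_pos h]
      rw [hfd] at ih
      rw [ih hm]
      simp
  | case2 n h =>
      have h0 : n = 0 := by omega
      subst h0
      rw [encBwidth, dif_neg (by omega), pvMsd, dif_neg (by omega)]
      simp

theorem pvMsd_eq_map (n : Int) (hn : 0 ≤ n) :
    pvMsd n = (PySem.List.pyRange 0 (encBwidth n 1 0) 1).map (fun i =>
      (PySem.List.pyGet? pvBASE62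
        (PySem.Int.mod (PySem.Int.floordiv n ((62 : Int) ^ ((encBwidth n 1 0) - 1 - i).toNat)) 62)).getD ' ') := by
  induction n using pvMsd.induct with
  | case1 n h ih =>
      have hfd : PySem.Int.floordiv n 62 = n / 62 :=
        PySem.Int.floordiv_eq_ediv_of_pos (by norm_num)
      have hm : 0 ≤ n / 62 := Int.ediv_nonneg (by omega) (by norm_num)
      rw [hfd] at ih
      have ih := ih hm
      have hw : encBwidth n 1 0 = encBwidth (n / 62) 1 0 + 1 := encBwidth_succ n h
      have hwm : 0 ≤ encBwidth (n / 62) 1 0 := by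
        rw [encBwidth_len (n / 62) hm]; positivity
      rw [pvMsd, dif_pos h, hw,
        PySem.List.pyRange_one_succ_right (by omega), List.map_append, List.map_cons, List.map_nil,
        hfd, ih]
      congr 1
      · -- leading digits: reindex through n / 62
        apply List.map_congr_left
        intro i hi
        have hib := (PySem.List.mem_pyRange_one).mp hi
        have hek : (encBwidth (n / 62) 1 0 + 1 - 1 - i).toNat
            = (encBwidth (n / 62) 1 0 - 1 - i).toNat + 1 := by omega
        rw [hek]
        have hpow : (0 : Int) < 62 ^ ((encBwidth (n / 62) 1 0 - 1 - i).toNat + 1) := by positivity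
        have hpow' : (0 : Int) < 62 ^ ((encBwidth (n / 62) 1 0 - 1 - i).toNat) := by positivity
        rw [PySem.Int.floordiv_eq_ediv_of_pos hpow, PySem.Int.floordiv_eq_ediv_of_pos hpow']
        congr 2
        rw [Int.ediv_ediv_of_nonneg (by norm_num : (0:Int) ≤ 62), ← pow_succ']
      · -- last digit: exponent 0
        have he0 : (encBwidth (n / 62) 1 0 + 1 - 1 - encBwidth (n / 62) 1 0).toNat = 0 := by omega
        rw [he0, pow_zero]
        have h1 : PySem.Int.floordiv n 1 = n := by
          rw [PySem.Int.floordiv_eq_ediv_of_pos (by norm_num), Int.ediv_one]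
        rw [h1]
  | case2 n h =>
      have h0 : n = 0 := by omega
      subst h0
      rw [pvMsd, dif_neg (by omega), encBwidth, dif_neg (by omega),
        PySem.List.pyRange_one_eq_nil (le_refl 0), List.map_nil]

-- ===== VERDICT (by name: the statement is the Claim_ definition above) =====
theorem encode_base62_spec : Claim_equal_encode_base62 := by
  intro num _ hpre
  unfold Spec_encode_base62 encode_base62 encode_base62_alt
  by_cases h0 : num = 0
  · simp [h0]
  · rw [if_neg h0, if_neg h0, encAloop_eq]
    simp only [List.nil_append, List.reverse_reverse]
    rw [pvMsd_eq_map num hpre]
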